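-- pv_equiv track=rewrite | github.com/korvus81/aoc2023 | day10/p10b.py | embiggen
-- ===== SOURCE A (Python) =====
-- def embiggen(map):
--     newmap = []
--     lastline = "." * (len(map[0])*2)
--     for row,l in enumerate(map):
--         newline = ""
--         for col,ch in enumerate(l):
--             if ch != "-" and ch != "F" and ch != "L": # no path to right
--                 newline += ch + "?"
--             else:
--                 newline += ch + "-" # to extend the path to the right
--         newmap.append(newline)
--         # hopefully only leave verticals
--         newmap.append(newline.replace("7","|").replace("J","?").replace("L","?").replace("F","|").replace("-","?").replace(".","?"))
--         lastline = newline
--     return newmap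
-- ===== SOURCE B (Python) =====
-- def embiggen(map):
--     VMAP = {'7': '|', 'F': '|', 'J': '?', 'L': '?', '-': '?', '.': '?'}
--     out = []
--     for l in map:
--         out.append(''.join(ch + ('-' if ch in '-FL' else '?') for ch in l))
--         out.append(''.join(VMAP.get(ch, ch) + '?' for ch in l))
--     return out
-- ===== Notes on version B (the rewrite author's own statement) =====
-- stated objective: simpler
-- what changed: B computes each vertical line directly from the source row's characters with one per-character mapping in the same single pass that builds the horizontal line, instead of A's second pass that rebuilds the already-doubled line through a chain of six str.replace calls.
import Mathlib
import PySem

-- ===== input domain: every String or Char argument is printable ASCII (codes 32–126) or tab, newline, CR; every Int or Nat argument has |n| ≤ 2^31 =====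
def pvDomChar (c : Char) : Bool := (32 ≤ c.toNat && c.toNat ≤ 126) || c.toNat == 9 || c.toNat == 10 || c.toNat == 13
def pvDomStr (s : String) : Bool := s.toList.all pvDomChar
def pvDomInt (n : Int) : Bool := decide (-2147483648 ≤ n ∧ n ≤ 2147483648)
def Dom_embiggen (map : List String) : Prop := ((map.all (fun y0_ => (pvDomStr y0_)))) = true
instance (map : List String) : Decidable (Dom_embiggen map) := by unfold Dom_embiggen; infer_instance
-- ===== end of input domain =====

-- B replaces A's six-fold str.replace second pass by a direct per-character mapping computed in the
-- same single pass over the source row (objective: simpler).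

-- ===== PORT A =====
-- inner loop: newline += ch + ("?" | "-")
def embiggenRowA (l : List Char) : List Char :=
  l.foldl (fun nl ch =>
    if ch ≠ '-' ∧ ch ≠ 'F' ∧ ch ≠ 'L' then nl ++ [ch, '?'] else nl ++ [ch, '-']) []

-- the replace chain of A's second appended line
def embiggenVertA (nl : List Char) : List Char :=
  PySem.Chars.replace (PySem.Chars.replace (PySem.Chars.replace (PySem.Chars.replace
    (PySem.Chars.replace (PySem.Chars.replace nl ['7'] ['|']) ['J'] ['?']) ['L'] ['?'])
      ['F'] ['|']) ['-'] ['?']) ['.'] ['?']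

-- `lastline = "." * (len(map[0])*2)` only matters for the IndexError on an empty map (the variable is
-- otherwise dead); pyGet? map 0 = none is exactly that raise.
def embiggen (map : List String) : List String :=
  match PySem.List.pyGet? map 0 with
  | none => []   -- Python raises IndexError here (excluded by Pre_)
  | some _ =>
    map.foldl (fun newmap l =>
      let newline := embiggenRowA l.toList
      (newmap ++ [String.ofList newline]) ++ [String.ofList (embiggenVertA newline)]) []

-- ===== PORT B =====
def vmapB : PySem.Dict Char Char :=
  PySem.Dict.ofList [('7', '|'), ('F', '|'), ('J', '?'), ('L', '?'), ('-', '?'), ('.', '?')]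

def embiggen_alt (map : List String) : List String :=
  map.foldl (fun out l =>
    (out ++ [String.ofList (l.toList.flatMap (fun ch =>
        [ch, if ch = '-' ∨ ch = 'F' ∨ ch = 'L' then '-' else '?']))]) ++
    [String.ofList (l.toList.flatMap (fun ch => [vmapB.getD ch ch, '?']))]) []

-- ===== PRECONDITION & SPEC =====
-- A reads map[0] and raises IndexError on the empty list; Pre_ excludes exactly that input.
def Pre_embiggen (map : List String) : Prop := map ≠ []
instance (map : List String) : Decidable (Pre_embiggen map) := by unfold Pre_embiggen; infer_instance
def pvWitness_embiggen : List String := ["F7", ".S"]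

def Spec_embiggen (map : List String) (out : List String) : Prop := out = embiggen_alt map
instance (map : List String) (out : List String) : Decidable (Spec_embiggen map out) := by unfold Spec_embiggen; infer_instance

-- ===== CLAIM (what is proved, stated in full; the proofs are below) =====
def Claim_equal_embiggen : Prop := ∀ (map : List String), Dom_embiggen map → Pre_embiggen map → Spec_embiggen map (embiggen map)

-- ===== LEMMAS AND PROOFS =====

-- single-char replace is a flatMap
theorem replace_go_single (o : Char) (ns : List Char) :
    ∀ (fuel : Nat) (cs acc : List Char), cs.length ≤ fuel →
      PySem.Chars.replace.go [o] ns fuel cs acc =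
        acc.reverse ++ cs.flatMap (fun c => if c = o then ns else [c]) := by
  intro fuel
  induction fuel with
  | zero =>
    intro cs acc h
    have : cs = [] := List.eq_nil_of_length_eq_zero (Nat.le_zero.mp h)
    subst this; simp [PySem.Chars.replace.go]
  | succ n ih =>
    intro cs acc h
    cases cs with
    | nil => simp [PySem.Chars.replace.go]
    | cons c t =>
      have hpre : List.isPrefixOf [o] (c :: t) = (o == c) := by
        simp [List.isPrefixOf]
      rw [PySem.Chars.replace.go]
      simp only [hpre]
      by_cases hc : c = o
      · subst hc
        simp only [beq_self_eq_true, if_pos]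
        rw [ih _ _ (by simpa using Nat.le_of_succ_le_succ h)]
        simp
      · have : (o == c) = false := by rw [beq_eq_false_iff_ne]; exact fun h' => hc h'.symm
        simp only [this, if_neg, Bool.false_eq_true, not_false_iff]
        rw [ih _ _ (by simpa using Nat.le_of_succ_le_succ h)]
        simp [hc]

theorem replace_single (cs : List Char) (o : Char) (ns : List Char) :
    PySem.Chars.replace cs [o] ns = cs.flatMap (fun c => if c = o then ns else [c]) := by
  rw [PySem.Chars.replace]
  simp only [List.isEmpty_cons, if_neg, Bool.false_eq_true, not_false_iff]
  exact replace_go_single o ns cs.length cs [] (le_refl _)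

-- A's horizontal row is a flatMap over the source characters
theorem rowA_eq_flatMap (l : List Char) :
    embiggenRowA l = l.flatMap (fun ch =>
      [ch, if ch = '-' ∨ ch = 'F' ∨ ch = 'L' then '-' else '?']) := by
  unfold embiggenRowA
  rw [show (fun (nl : List Char) (ch : Char) =>
        if ch ≠ '-' ∧ ch ≠ 'F' ∧ ch ≠ 'L' then nl ++ [ch, '?'] else nl ++ [ch, '-'])
      = (fun nl ch => nl ++ [ch, if ch = '-' ∨ ch = 'F' ∨ ch = 'L' then '-' else '?']) from ?_]
  · exact PySem.List.foldl_append_eq_flatMap _ _ _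
  · funext nl ch
    by_cases h : ch = '-' ∨ ch = 'F' ∨ ch = 'L' <;> simp [h] <;> tauto

-- the vmap lookup as nested ifs
theorem vmapB_getD (c : Char) :
    vmapB.getD c c =
      if c = '7' then '|' else if c = 'F' then '|' else if c = 'J' then '?'
      else if c = 'L' then '?' else if c = '-' then '?' else if c = '.' then '?' else c := by
  by_cases h7 : c = '7'; · subst h7; decide
  by_cases hF : c = 'F'; · subst hF; decide
  by_cases hJ : c = 'J'; · subst hJ; decide
  by_cases hL : c = 'L'; · subst hL; decide
  by_cases hD : c = '-'; · subst hD; decide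
  by_cases hP : c = '.'; · subst hP; decide
  have hit : vmapB.items = [('7', '|'), ('F', '|'), ('J', '?'), ('L', '?'), ('-', '?'), ('.', '?')] := by
    decide
  rw [if_neg h7, if_neg hF, if_neg hJ, if_neg hL, if_neg hD, if_neg hP]
  simp only [PySem.Dict.getD, PySem.Dict.get?, hit]
  rw [List.find?_cons_of_neg (by show ¬ ('7' == c) = true; rw [beq_iff_eq]; exact fun h => h7 h.symm),
      List.find?_cons_of_neg (by show ¬ ('F' == c) = true; rw [beq_iff_eq]; exact fun h => hF h.symm),
      List.find?_cons_of_neg (by show ¬ ('J' == c) = true; rw [beq_iff_eq]; exact fun h => hJ h.symm),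
      List.find?_cons_of_neg (by show ¬ ('L' == c) = true; rw [beq_iff_eq]; exact fun h => hL h.symm),
      List.find?_cons_of_neg (by show ¬ ('-' == c) = true; rw [beq_iff_eq]; exact fun h => hD h.symm),
      List.find?_cons_of_neg (by show ¬ ('.' == c) = true; rw [beq_iff_eq]; exact fun h => hP h.symm),
      List.find?_nil]
  rfl

-- the replace chain on a doubled row equals B's direct per-character mapping
theorem vertA_eq (l : List Char) :
    embiggenVertA (l.flatMap (fun ch =>
        [ch, if ch = '-' ∨ ch = 'F' ∨ ch = 'L' then '-' else '?'])) =
      l.flatMap (fun ch => [vmapB.getD ch ch, '?']) := by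
  unfold embiggenVertA
  simp only [replace_single, List.flatMap_assoc]
  apply List.flatMap_congr -- pointwise: the chained single-char replacements compose to the vmap
  intro c _
  rw [vmapB_getD]
  by_cases h7 : c = '7' <;> by_cases hF : c = 'F' <;> by_cases hJ : c = 'J' <;>
    by_cases hL : c = 'L' <;> by_cases hD : c = '-' <;> by_cases hP : c = '.' <;>
    simp_all

-- the two top-level folds agree for any accumulator
theorem folds_eq (ms : List String) :
    ∀ acc : List String,
      ms.foldl (fun newmap l =>
        let newline := embiggenRowA l.toList
        (newmap ++ [String.ofList newline]) ++ [String.ofList (embiggenVertA newline)]) acc =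
      ms.foldl (fun out l =>
        (out ++ [String.ofList (l.toList.flatMap (fun ch =>
            [ch, if ch = '-' ∨ ch = 'F' ∨ ch = 'L' then '-' else '?']))]) ++
        [String.ofList (l.toList.flatMap (fun ch => [vmapB.getD ch ch, '?']))]) acc := by
  induction ms with
  | nil => intro acc; rfl
  | cons m t ih =>
    intro acc
    simp only [List.foldl_cons]
    rw [show embiggenRowA m.toList = m.toList.flatMap (fun ch =>
          [ch, if ch = '-' ∨ ch = 'F' ∨ ch = 'L' then '-' else '?']) from rowA_eq_flatMap _,
        vertA_eq]
    exact ih _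

-- ===== VERDICT (by name: the statement is the Claim_ definition above) =====
theorem embiggen_spec : Claim_equal_embiggen := by
  intro map _ hpre
  unfold Spec_embiggen embiggen embiggen_alt
  cases map with
  | nil => exact absurd rfl hpre
  | cons m t =>
    have h0 : PySem.List.pyGet? (m :: t) 0 = some m := by
      have := PySem.List.pyGet?_natCast (m :: t) 0
      simpa using this
    rw [h0]
    exact folds_eq (m :: t) []
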